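-- pv_equiv track=rewrite | github.com/gvaysman222/time-capsule | main.py | prepare_data_for_gpt
-- ===== SOURCE A (Python) =====
-- def prepare_data_for_gpt(formatted_data):
--     """Преобразует данные для использования в GPT"""
--     questions = ["Вопрос 1", "Вопрос 2", "Вопрос 3", "Вопрос 4", "Вопрос 5"]
--     result = {}
--
--     # Объединяем ответы по каждому вопросу
--     for i, question in enumerate(questions):
--         result[question] = ", ".join([
--             user["responses"][i] for user in formatted_data["team_responses"] if i < len(user["responses"])
--         ])
--
--     return result
-- ===== SOURCE B (Python) =====
-- def prepare_data_for_gpt(formatted_data):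
--     """Преобразует данные для использования в GPT"""
--     questions = ["Вопрос 1", "Вопрос 2", "Вопрос 3", "Вопрос 4", "Вопрос 5"]
--     # single user-major pass: flatten to (question, response) pairs, then group
--     pairs = [(questions[i], r)
--              for user in formatted_data["team_responses"]
--              for i, r in enumerate(user["responses"]) if i < 5]
--     buckets = {q: [] for q in questions}
--     for q, r in pairs:
--         buckets[q].append(r)
--     return {q: ", ".join(v) for q, v in buckets.items()}
-- ===== Notes on version B (the rewrite author's own statement) =====
-- stated objective: alternative
-- what changed: A makes five question-major passes over the team, one per question, joining each comprehension; B makes a single user-major pass that flattens all responses into (question, response) pairs, groups them into per-question buckets via one dict-grouping loop, and joins each bucket once at the end.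
import Mathlib
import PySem

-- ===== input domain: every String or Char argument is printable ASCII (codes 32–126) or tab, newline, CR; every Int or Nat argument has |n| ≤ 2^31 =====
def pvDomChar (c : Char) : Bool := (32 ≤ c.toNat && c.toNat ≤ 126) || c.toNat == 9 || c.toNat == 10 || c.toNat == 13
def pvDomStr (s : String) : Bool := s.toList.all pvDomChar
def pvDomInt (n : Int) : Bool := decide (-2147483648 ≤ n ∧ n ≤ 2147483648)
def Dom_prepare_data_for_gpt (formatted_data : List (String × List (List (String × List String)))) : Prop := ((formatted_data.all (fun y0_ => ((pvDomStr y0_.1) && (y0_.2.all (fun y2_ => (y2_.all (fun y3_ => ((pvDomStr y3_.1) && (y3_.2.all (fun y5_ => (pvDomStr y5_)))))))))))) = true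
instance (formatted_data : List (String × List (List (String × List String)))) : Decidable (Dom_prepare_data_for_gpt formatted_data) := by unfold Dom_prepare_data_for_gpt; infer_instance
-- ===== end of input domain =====

-- B replaces A's five question-major passes over the team by one user-major pass that
-- flattens to (question, response) pairs and groups them; same result, different decomposition.

-- ===== PORT A =====
def prepare_data_for_gpt (formatted_data : List (String × List (List (String × List String)))) : List (String × String) :=
  let questions : List String := ["Вопрос 1", "Вопрос 2", "Вопрос 3", "Вопрос 4", "Вопрос 5"]
  -- for i, question in enumerate(questions): result[question] = ", ".join([user["responses"][i] … if i < len(…)])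
  let result := (PySem.List.enumerate questions).foldl
    (fun res iq => res.insert iq.2 (PySem.Str.join ", "
      ((((PySem.Dict.mk formatted_data).getD "team_responses" []).filter
          (fun user => iq.1 < PySem.List.len ((PySem.Dict.mk user).getD "responses" []))).map
        (fun user => PySem.List.pyGetD ((PySem.Dict.mk user).getD "responses" []) iq.1 ""))))
    PySem.Dict.empty
  result.items

-- ===== PORT B =====
def prepare_data_for_gpt_alt (formatted_data : List (String × List (List (String × List String)))) : List (String × String) :=
  let questions : List String := ["Вопрос 1", "Вопрос 2", "Вопрос 3", "Вопрос 4", "Вопрос 5"]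
  -- pairs = [(questions[i], r) for user in … for i, r in enumerate(user["responses"]) if i < 5]
  let pairs := ((PySem.Dict.mk formatted_data).getD "team_responses" []).flatMap
    (fun user => ((PySem.List.enumerate ((PySem.Dict.mk user).getD "responses" [])).filter
        (fun ir => ir.1 < 5)).map (fun ir => (PySem.List.pyGetD questions ir.1 "", ir.2)))
  -- buckets = {q: [] for q in questions}; for q, r in pairs: buckets[q].append(r)
  let buckets0 := questions.foldl (fun d q => d.insert q ([] : List String)) PySem.Dict.empty
  let buckets := pairs.foldl (fun d p => d.modify p.1 [] fun x => x ++ [p.2]) buckets0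
  -- {q: ", ".join(v) for q, v in buckets.items()}
  buckets.items.map (fun qv => (qv.1, PySem.Str.join ", " qv.2))

-- ===== PRECONDITION & SPEC =====
-- Pre_ excludes exactly the inputs on which Python A raises KeyError: a missing
-- "team_responses" key, or a team member without a "responses" key.
def Pre_prepare_data_for_gpt (formatted_data : List (String × List (List (String × List String)))) : Prop :=
  (PySem.Dict.mk formatted_data).contains "team_responses" = true ∧
  ∀ u ∈ (PySem.Dict.mk formatted_data).getD "team_responses" [],
    (PySem.Dict.mk u).contains "responses" = true
instance (formatted_data : List (String × List (List (String × List String)))) : Decidable (Pre_prepare_data_for_gpt formatted_data) := by unfold Pre_prepare_data_for_gpt; infer_instance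

def pvWitness_prepare_data_for_gpt : (List (String × List (List (String × List String)))) :=
  [("team_responses", [[("responses", ["yes", "no"])], [("responses", ["maybe"])]])]

def Spec_prepare_data_for_gpt (formatted_data : List (String × List (List (String × List String)))) (out : List (String × String)) : Prop := out = prepare_data_for_gpt_alt formatted_data
instance (formatted_data : List (String × List (List (String × List String)))) (out : List (String × String)) : Decidable (Spec_prepare_data_for_gpt formatted_data out) := by unfold Spec_prepare_data_for_gpt; infer_instance

-- ===== CLAIM (what is proved, stated in full; the proofs are below) =====
def Claim_equal_prepare_data_for_gpt : Prop := ∀ (formatted_data : List (String × List (List (String × List String)))), Dom_prepare_data_for_gpt formatted_data → Pre_prepare_data_for_gpt formatted_data → Spec_prepare_data_for_gpt formatted_data (prepare_data_for_gpt formatted_data)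

-- ===== LEMMAS AND PROOFS =====

def pvQuestions : List String := ["Вопрос 1", "Вопрос 2", "Вопрос 3", "Вопрос 4", "Вопрос 5"]

def pvTeam (formatted_data : List (String × List (List (String × List String)))) :
    List (List (String × List String)) :=
  (PySem.Dict.mk formatted_data).getD "team_responses" []

def pvRs (user : List (String × List String)) : List String :=
  (PySem.Dict.mk user).getD "responses" []

def pvPairsOf (user : List (String × List String)) : List (String × String) :=
  ((PySem.List.enumerate (pvRs user)).filter (fun ir => ir.1 < 5)).map
    (fun ir => (PySem.List.pyGetD pvQuestions ir.1 "", ir.2))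

-- A's per-question comprehension
def pvAcomp (formatted_data : List (String × List (List (String × List String)))) (i : Int) :
    List String :=
  ((pvTeam formatted_data).filter (fun u => i < PySem.List.len (pvRs u))).map
    (fun u => PySem.List.pyGetD (pvRs u) i "")

-- distinctness of the five question strings, at getD level
lemma pvQ_ne (s i : Nat) (hs : s < 5) (hi : i < 5) (hne : s ≠ i) :
    pvQuestions.getD s "" ≠ pvQuestions.getD i "" := by
  interval_cases s <;> interval_cases i <;> first | exact absurd rfl hne | decide

-- a mapped filter as a flatMap
lemma pvFilterMap {α β : Type} (l : List α) (p : α → Bool) (f : α → β) :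
    (l.filter p).map f = l.flatMap (fun x => if p x then [f x] else []) := by
  induction l with
  | nil => rfl
  | cons x xs ih =>
    by_cases h : p x <;> simp [List.flatMap_cons, h, ih]

-- Set.update by already-present elements is the identity
lemma pvSet_update_of_mem {α : Type} [BEq α] [LawfulBEq α] (xs : List α) (s : PySem.Set α)
    (h : ∀ x ∈ xs, x ∈ s) : PySem.Set.update s xs = s := by
  induction xs generalizing s with
  | nil => rfl
  | cons x xs ih =>
    have hadd : PySem.Set.add s x = s := by
      simp [PySem.Set.add, h x List.mem_cons_self]
    simp only [PySem.Set.update, List.foldl_cons] at *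
    rw [hadd]
    exact ih s (fun y hy => h y (by simp [hy]))

-- core: the contribution of one enumerate run (start s) to question i
lemma pvQcore (rs : List String) (i : Nat) (hi : i < 5) : ∀ (s : Nat),
    ((((PySem.List.enumerate rs (s : Int)).filter (fun ir => ir.1 < 5)).map
        (fun ir => (PySem.List.pyGetD pvQuestions ir.1 "", ir.2))).filter
        (fun p => p.1 == pvQuestions.getD i "")).map (fun p => p.2)
    = if s ≤ i ∧ i - s < rs.length then [rs.getD (i - s) ""] else [] := by
  induction rs with
  | nil =>
    intro s
    rw [if_neg (by simp)]
    simp [PySem.List.enumerate]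
  | cons r rest ih =>
    intro s
    rw [PySem.List.enumerate_cons,
      show ((s : Int) + 1) = ((s + 1 : Nat) : Int) from by push_cast; ring]
    by_cases hs5 : s < 5
    · rw [List.filter_cons_of_pos (by simpa using (by exact_mod_cast hs5 : (s : Int) < 5)),
        List.map_cons,
        show PySem.List.pyGetD pvQuestions ((s : Nat) : Int) "" = pvQuestions.getD s "" from by
          simp]
      by_cases hsi : s = i
      · subst hsi
        rw [List.filter_cons_of_pos (by simp), List.map_cons]
        have htail := ih (s + 1)
        rw [if_neg (by omega)] at htail
        rw [htail, if_pos ⟨le_refl s, by simp⟩]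
        simp
      · rw [List.filter_cons_of_neg (by simpa using pvQ_ne s i hs5 hi hsi), ih (s + 1)]
        by_cases hle : s + 1 ≤ i
        · by_cases hlen : i - (s + 1) < rest.length
          · rw [if_pos ⟨hle, hlen⟩, if_pos ⟨by omega, by simp only [List.length_cons]; omega⟩,
              show i - s = (i - (s + 1)) + 1 from by omega, List.getD_cons_succ]
          · rw [if_neg (by omega), if_neg (by simp only [List.length_cons]; omega)]
        · rw [if_neg (by omega), if_neg (by omega)]
    · rw [List.filter_cons_of_neg (by simp; omega), ih (s + 1),
        if_neg (by omega), if_neg (by omega)]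

-- one user's pairs, filtered to question i
lemma pvPeruser (user : List (String × List String)) (i : Nat) (hi : i < 5) :
    ((pvPairsOf user).filter (fun p => p.1 == pvQuestions.getD i "")).map (fun p => p.2)
    = if (i : Int) < PySem.List.len (pvRs user) then [PySem.List.pyGetD (pvRs user) (i : Int) ""]
      else [] := by
  have h := pvQcore (pvRs user) i hi 0
  rw [show (((0 : Nat)) : Int) = (0 : Int) from rfl] at h
  simp only [Nat.zero_le, true_and, Nat.sub_zero] at h
  unfold pvPairsOf
  rw [h]
  by_cases hlen : i < (pvRs user).length
  · rw [if_pos hlen, if_pos (by rw [PySem.List.len_eq]; exact_mod_cast hlen),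
      PySem.List.pyGetD_natCast]
  · rw [if_neg hlen, if_neg (by rw [PySem.List.len_eq]; exact_mod_cast hlen)]

-- grouping the flattened pair list per question equals A's comprehension
lemma pvGroup (formatted_data : List (String × List (List (String × List String)))) (i : Nat)
    (hi : i < 5) :
    ((((pvTeam formatted_data).flatMap pvPairsOf).filter
        (fun p => p.1 == pvQuestions.getD i "")).map (fun p => p.2))
    = pvAcomp formatted_data (i : Int) := by
  rw [List.filter_flatMap, List.map_flatMap]
  unfold pvAcomp
  rw [pvFilterMap]
  refine List.flatMap_congr (fun u _ => ?_)
  rw [pvPeruser u i hi]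
  simp

-- A's port, in closed five-entry form
lemma pvA_eq (formatted_data : List (String × List (List (String × List String)))) :
    prepare_data_for_gpt formatted_data
    = [("Вопрос 1", PySem.Str.join ", " (pvAcomp formatted_data 0)),
       ("Вопрос 2", PySem.Str.join ", " (pvAcomp formatted_data 1)),
       ("Вопрос 3", PySem.Str.join ", " (pvAcomp formatted_data 2)),
       ("Вопрос 4", PySem.Str.join ", " (pvAcomp formatted_data 3)),
       ("Вопрос 5", PySem.Str.join ", " (pvAcomp formatted_data 4))] := by
  have h := PySem.Dict.items_foldl_insert_fresh (PySem.List.enumerate pvQuestions)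
      (fun iq => iq.2)
      (fun iq => PySem.Str.join ", " (pvAcomp formatted_data iq.1))
      PySem.Dict.empty
      (fun a _ => PySem.Dict.contains_empty _) (by decide)
  rw [show PySem.List.enumerate pvQuestions
        = [(0, "Вопрос 1"), (1, "Вопрос 2"), (2, "Вопрос 3"), (3, "Вопрос 4"), (4, "Вопрос 5")]
      from by decide] at h
  simpa [prepare_data_for_gpt, PySem.List.enumerate, pvAcomp, pvTeam, pvRs] using h

-- B's port, as a map over the five questions
lemma pvB_eq (formatted_data : List (String × List (List (String × List String)))) :
    prepare_data_for_gpt_alt formatted_data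
    = pvQuestions.map (fun q => (q, PySem.Str.join ", "
        ((((pvTeam formatted_data).flatMap pvPairsOf).filter
            (fun p => p.1 == q)).map (fun p => p.2)))) := by
  have hsub : ∀ p ∈ (pvTeam formatted_data).flatMap pvPairsOf,
      p.1 ∈ (pvQuestions : PySem.Set String) := by
    intro p hp
    rcases List.mem_flatMap.mp hp with ⟨u, _, hpu⟩
    unfold pvPairsOf at hpu
    rcases List.mem_map.mp hpu with ⟨ir, hir, hpe⟩
    have hlt : ir.1 < 5 := by
      have := List.of_mem_filter hir
      simpa using this
    have hge : 0 ≤ ir.1 := by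
      rcases (PySem.List.mem_enumerate_iff _ _ _).mp (List.mem_of_mem_filter hir) with ⟨k, hk, hk2⟩
      subst hk2; simp
    have hmem : PySem.List.pyGetD pvQuestions ir.1 "" ∈ pvQuestions := by
      apply PySem.List.pyGetD_mem
      constructor <;> simp [pvQuestions] <;> omega
    rw [← hpe]
    exact hmem
  have hB0 : pvQuestions.foldl (fun d q => d.insert q ([] : List String)) PySem.Dict.empty
      = PySem.Dict.mk [("Вопрос 1", []), ("Вопрос 2", []), ("Вопрос 3", []),
                       ("Вопрос 4", []), ("Вопрос 5", [])] := by decide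
  have hkeys : ((((pvTeam formatted_data).flatMap pvPairsOf).foldl
        (fun d p => d.modify p.1 [] fun x => x ++ [p.2])
        (pvQuestions.foldl (fun d q => d.insert q ([] : List String)) PySem.Dict.empty)).keys)
      = pvQuestions := by
    rw [PySem.Dict.keys_foldl_modify_key ((pvTeam formatted_data).flatMap pvPairsOf)
        Prod.fst [] (fun _ p => fun x => x ++ [p.2])]
    rw [hB0]
    have : (PySem.Dict.mk [("Вопрос 1", ([] : List String)), ("Вопрос 2", []), ("Вопрос 3", []),
        ("Вопрос 4", []), ("Вопрос 5", [])]).keys = pvQuestions := by decide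
    rw [this]
    apply pvSet_update_of_mem
    intro x hx
    rcases List.mem_map.mp hx with ⟨p, hp, hpe⟩
    rw [← hpe]
    exact hsub p hp
  have hitems := PySem.Dict.items_eq_map_keys
      (((pvTeam formatted_data).flatMap pvPairsOf).foldl
        (fun d p => d.modify p.1 [] fun x => x ++ [p.2])
        (pvQuestions.foldl (fun d q => d.insert q ([] : List String)) PySem.Dict.empty))
      (by rw [hkeys]; decide) ([] : List String)
  rw [hkeys] at hitems
  show (((pvTeam formatted_data).flatMap
      (fun user => ((PySem.List.enumerate (pvRs user)).filter (fun ir => ir.1 < 5)).map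
        (fun ir => (PySem.List.pyGetD pvQuestions ir.1 "", ir.2)))).foldl
      (fun d p => d.modify p.1 [] fun x => x ++ [p.2])
      (pvQuestions.foldl (fun d q => d.insert q ([] : List String)) PySem.Dict.empty)).items.map
      (fun qv => (qv.1, PySem.Str.join ", " qv.2)) = _
  rw [show (fun user => ((PySem.List.enumerate (pvRs user)).filter (fun ir => ir.1 < 5)).map
        (fun ir => (PySem.List.pyGetD pvQuestions ir.1 "", ir.2))) = pvPairsOf from rfl]
  rw [hitems, List.map_map]
  apply List.map_congr_left
  intro q hq
  simp only [Function.comp]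
  congr 1
  rw [PySem.Dict.getD_foldl_modify_append, hB0]
  have hb0q : (PySem.Dict.mk [("Вопрос 1", ([] : List String)), ("Вопрос 2", []), ("Вопрос 3", []),
      ("Вопрос 4", []), ("Вопрос 5", [])]).getD q [] = [] := by
    fin_cases hq <;> decide
  rw [hb0q]
  simp

-- the five grouped questions, in literal form
lemma pvG0 (fd : List (String × List (List (String × List String)))) :
    (((pvTeam fd).flatMap pvPairsOf).filter (fun p => p.1 == "Вопрос 1")).map (fun p => p.2)
    = pvAcomp fd 0 := by
  have h := pvGroup fd 0 (by omega)
  rw [show pvQuestions.getD 0 "" = "Вопрос 1" from rfl,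
    show (((0 : Nat)) : Int) = (0 : Int) from rfl] at h
  exact h

lemma pvG1 (fd : List (String × List (List (String × List String)))) :
    (((pvTeam fd).flatMap pvPairsOf).filter (fun p => p.1 == "Вопрос 2")).map (fun p => p.2)
    = pvAcomp fd 1 := by
  have h := pvGroup fd 1 (by omega)
  rw [show pvQuestions.getD 1 "" = "Вопрос 2" from rfl,
    show (((1 : Nat)) : Int) = (1 : Int) from by decide] at h
  exact h

lemma pvG2 (fd : List (String × List (List (String × List String)))) :
    (((pvTeam fd).flatMap pvPairsOf).filter (fun p => p.1 == "Вопрос 3")).map (fun p => p.2)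
    = pvAcomp fd 2 := by
  have h := pvGroup fd 2 (by omega)
  rw [show pvQuestions.getD 2 "" = "Вопрос 3" from rfl,
    show (((2 : Nat)) : Int) = (2 : Int) from by decide] at h
  exact h

lemma pvG3 (fd : List (String × List (List (String × List String)))) :
    (((pvTeam fd).flatMap pvPairsOf).filter (fun p => p.1 == "Вопрос 4")).map (fun p => p.2)
    = pvAcomp fd 3 := by
  have h := pvGroup fd 3 (by omega)
  rw [show pvQuestions.getD 3 "" = "Вопрос 4" from rfl,
    show (((3 : Nat)) : Int) = (3 : Int) from by decide] at h
  exact h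

lemma pvG4 (fd : List (String × List (List (String × List String)))) :
    (((pvTeam fd).flatMap pvPairsOf).filter (fun p => p.1 == "Вопрос 5")).map (fun p => p.2)
    = pvAcomp fd 4 := by
  have h := pvGroup fd 4 (by omega)
  rw [show pvQuestions.getD 4 "" = "Вопрос 5" from rfl,
    show (((4 : Nat)) : Int) = (4 : Int) from by decide] at h
  exact h

-- ===== VERDICT (by name: the statement is the Claim_ definition above) =====
theorem prepare_data_for_gpt_spec : Claim_equal_prepare_data_for_gpt := by
  intro fd _ _
  unfold Spec_prepare_data_for_gpt
  rw [pvA_eq, pvB_eq]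
  simp only [pvQuestions, List.map_cons, List.map_nil]
  rw [pvG0 fd, pvG1 fd, pvG2 fd, pvG3 fd, pvG4 fd]
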